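-- pv_equiv track=rewrite | github.com/na-trium-144/mml-generation | main.py | subnote
-- ===== SOURCE A (Python) =====
-- def subnote(m, chord):
--     n = (m + 7 - 2) % 7
--     while n not in [chord % 7, (chord + 2) % 7, (chord + 4) % 7]:
--         n -= 1
--         n = (n + 7) % 7
--     if n == 0:
--         n = 7
--     return n
-- ===== SOURCE B (Python) =====
-- def subnote(m, chord):
--     start = (m + 5) % 7
--     d = min((start - t) % 7 for t in (chord % 7, (chord + 2) % 7, (chord + 4) % 7))
--     t = (start - d) % 7
--     return 7 if t == 0 else t
-- ===== Notes on version B (the rewrite author's own statement) =====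
-- stated objective: simpler
-- what changed: Replaces A's step-by-step downward scan (decrement mod 7 until hitting a chord tone) with a direct closed-form pick: the minimum cyclic downward distance (start - t) % 7 over the three chord tones, one modular subtraction, and the 0->7 remap.
import Mathlib
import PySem

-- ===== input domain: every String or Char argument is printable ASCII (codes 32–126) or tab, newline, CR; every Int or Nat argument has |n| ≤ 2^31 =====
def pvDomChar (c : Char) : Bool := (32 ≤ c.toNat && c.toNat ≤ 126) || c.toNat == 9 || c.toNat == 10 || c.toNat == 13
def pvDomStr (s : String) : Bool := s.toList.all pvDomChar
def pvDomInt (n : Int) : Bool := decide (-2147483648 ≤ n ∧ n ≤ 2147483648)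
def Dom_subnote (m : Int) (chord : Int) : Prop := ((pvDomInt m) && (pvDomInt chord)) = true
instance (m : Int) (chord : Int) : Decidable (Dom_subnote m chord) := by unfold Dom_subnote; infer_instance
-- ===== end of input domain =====

-- B replaces A's one-semitone-at-a-time downward scan by a closed-form argmin over the
-- three chord tones via cyclic distance (start - t) % 7; objective: simpler.

-- ===== PORT A =====
-- the while loop; it always exits within 7 iterations (the tone set mod 7 is nonempty
-- and n cycles through all residues), so fuel 7 is a pure totality guard
def subnoteLoop : Nat → Int → Int → Int
  | 0, n, _ => n
  | f + 1, n, chord =>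
    if n ∈ [PySem.Int.mod chord 7, PySem.Int.mod (chord + 2) 7, PySem.Int.mod (chord + 4) 7]
    then n
    else subnoteLoop f (PySem.Int.mod ((n - 1) + 7) 7) chord

def subnote (m : Int) (chord : Int) : Int :=
  let n := PySem.Int.mod (m + 7 - 2) 7
  let n := subnoteLoop 7 n chord
  if n = 0 then 7 else n

-- ===== PORT B =====
def subnote_alt (m : Int) (chord : Int) : Int :=
  let start := PySem.Int.mod (m + 5) 7
  let d := min (min (PySem.Int.mod (start - PySem.Int.mod chord 7) 7)
                    (PySem.Int.mod (start - PySem.Int.mod (chord + 2) 7) 7))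
               (PySem.Int.mod (start - PySem.Int.mod (chord + 4) 7) 7)
  let t := PySem.Int.mod (start - d) 7
  if t = 0 then 7 else t

-- ===== PRECONDITION & SPEC =====
def Spec_subnote (m : Int) (chord : Int) (out : Int) : Prop := out = subnote_alt m chord
instance (m : Int) (chord : Int) (out : Int) : Decidable (Spec_subnote m chord out) := by unfold Spec_subnote; infer_instance

-- ===== CLAIM (what is proved, stated in full; the proofs are below) =====
def Claim_equal_subnote : Prop := ∀ (m : Int) (chord : Int), Dom_subnote m chord → Spec_subnote m chord (subnote m chord)

-- ===== LEMMAS AND PROOFS =====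

theorem pymod7_emod (a : Int) : PySem.Int.mod a 7 = a % 7 :=
  PySem.Int.mod_eq_emod_of_pos (by norm_num)

theorem pymod7_reduce (a k : Int) : PySem.Int.mod (a % 7 + k) 7 = PySem.Int.mod (a + k) 7 := by
  rw [pymod7_emod, pymod7_emod]; omega

theorem subnoteLoop_chord_emod (f : Nat) (n chord : Int) :
    subnoteLoop f n (chord % 7) = subnoteLoop f n chord := by
  induction f generalizing n with
  | zero => rfl
  | succ f ih =>
    simp only [subnoteLoop]
    have h0 : PySem.Int.mod (chord % 7) 7 = PySem.Int.mod chord 7 := by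
      rw [pymod7_emod, pymod7_emod]; omega
    rw [h0, pymod7_reduce chord 2, pymod7_reduce chord 4]
    split <;> simp [ih]

theorem subnote_reduce (m chord : Int) :
    subnote m chord = subnote (m % 7) (chord % 7) := by
  simp only [subnote]
  rw [subnoteLoop_chord_emod]
  have : PySem.Int.mod (m % 7 + 7 - 2) 7 = PySem.Int.mod (m + 7 - 2) 7 := by
    rw [pymod7_emod, pymod7_emod]; omega
  rw [this]

theorem subnote_alt_reduce (m chord : Int) :
    subnote_alt m chord = subnote_alt (m % 7) (chord % 7) := by
  simp only [subnote_alt]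
  have h0 : PySem.Int.mod (chord % 7) 7 = PySem.Int.mod chord 7 := by
    rw [pymod7_emod, pymod7_emod]; omega
  rw [pymod7_reduce m 5, h0, pymod7_reduce chord 2, pymod7_reduce chord 4]

-- ===== VERDICT (by name: the statement is the Claim_ definition above) =====
theorem subnote_spec : Claim_equal_subnote := by
  intro m chord _
  show subnote m chord = subnote_alt m chord
  rw [subnote_reduce, subnote_alt_reduce]
  have hm1 : 0 ≤ m % 7 := Int.emod_nonneg _ (by norm_num)
  have hm2 : m % 7 < 7 := Int.emod_lt_of_pos _ (by norm_num)
  have hc1 : 0 ≤ chord % 7 := Int.emod_nonneg _ (by norm_num)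
  have hc2 : chord % 7 < 7 := Int.emod_lt_of_pos _ (by norm_num)
  interval_cases (m % 7) <;> interval_cases (chord % 7) <;> decide
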